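-- pv_equiv track=rewrite | github.com/yumnaamehdi/CS1114 | homework/HW6/hw6.py | in_bounds
-- ===== SOURCE A (Python) =====
-- def in_bounds(start_position, ship_size, orientation):
--     """Checks that a ship requiring ship_size positions can be placed at start position.
--
--     :param start_position: tuple representing the starting position of ship on the board
--     :param ship_size: number of positions needed to place ship
--     :param orientation: the orientation of the ship ('v' - vertical, 'h' - horizontal)
--     :return status: True if ship placement inside board boundary, False otherwise
--     """
--
--     test_ship = []
--     if orientation == 'h':
--         for i in range(ship_size):
--             col = int(start_position[1]) + i
--             row = start_position[0]
--             test_ship.append((str(row),col))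
--     elif orientation == 'v':
--         for i in range(ship_size):
--             col = int(start_position[1])
--             row = chr(ord(start_position[0]) + i)
--             test_ship.append((row,col))
--     for tup in test_ship:
--         if not (ord(tup[0]) >= ord('A') and ord(tup[0]) <= ord('J')):
--             return False
--         if not(tup[1] >= 0 and tup[1] <= 9):
--             return False
--     return True
-- ===== SOURCE B (Python) =====
-- def in_bounds(start_position, ship_size, orientation):
--     """Endpoint check: a straight ship covers an interval of rows or columns,
--     so it fits iff its two endpoint cells are on the board."""
--     if orientation != 'h' and orientation != 'v':
--         return True
--     if ship_size < 1:
--         return True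
--     row0 = ord(start_position[0])
--     col0 = int(start_position[1])
--     if orientation == 'h':
--         row1, col1 = row0, col0 + ship_size - 1
--     else:
--         row1, col1 = row0 + ship_size - 1, col0
--     return (ord('A') <= row0 <= ord('J') and 0 <= col0 <= 9 and
--             ord('A') <= row1 <= ord('J') and 0 <= col1 <= 9)
-- ===== Notes on version B (the rewrite author's own statement) =====
-- stated objective: faster
-- what changed: B drops A's materialised list of all ship_size cells and its scan; since a straight ship covers a contiguous interval of rows or columns, B checks only the two endpoint cells in O(1).
-- crash fix: For orientation 'v' with a single-letter start row and ship_size large enough that ord(row)+ship_size-1 exceeds 0x10FFFF, A raises ValueError inside chr() while B (which never builds the cells) returns False. — e.g. on in_bounds(("A", 0), 1114112, "v"): A raises ValueError, B returns false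
import Mathlib
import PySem

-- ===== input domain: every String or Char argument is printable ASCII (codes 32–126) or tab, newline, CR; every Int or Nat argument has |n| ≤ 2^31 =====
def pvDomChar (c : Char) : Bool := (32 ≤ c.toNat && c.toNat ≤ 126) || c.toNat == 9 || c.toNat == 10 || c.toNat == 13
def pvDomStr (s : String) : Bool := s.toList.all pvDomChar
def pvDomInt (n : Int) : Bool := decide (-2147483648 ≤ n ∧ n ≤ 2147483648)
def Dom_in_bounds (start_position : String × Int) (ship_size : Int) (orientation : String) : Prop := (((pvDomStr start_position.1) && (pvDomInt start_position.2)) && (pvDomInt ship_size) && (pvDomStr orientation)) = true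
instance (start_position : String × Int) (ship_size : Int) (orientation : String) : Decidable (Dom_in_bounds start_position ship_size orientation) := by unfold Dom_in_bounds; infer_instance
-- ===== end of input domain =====

-- B replaces A's list of all ship_size cells (and the scan over it) by an O(1) check of the two endpoint cells.


-- ===== PORT A =====
-- ord(s) on a one-character string (exact when s.length = 1, guaranteed by Pre_):
def pyOrd (s : String) : Int := ((s.toList.headD 'A').toNat : Int)
-- chr(n) (exact for valid non-surrogate code points; Pre_/Dom keep every code A's result depends on below 0xD800):
def pyChr (n : Int) : String := String.ofList [Char.ofNat n.toNat]

-- the final 'for tup in test_ship' loop of A, with its two early returns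
def checkLoop : List (String × Int) → Bool
  | [] => true
  | t :: rest =>
      if ¬(pyOrd t.1 ≥ 65 ∧ pyOrd t.1 ≤ 74) then false
      else if ¬(t.2 ≥ 0 ∧ t.2 ≤ 9) then false
      else checkLoop rest

def in_bounds (start_position : String × Int) (ship_size : Int) (orientation : String) : Bool :=
  let test_ship : List (String × Int) :=
    if orientation = "h" then
      (PySem.List.pyRange 0 ship_size 1).foldl
        (fun acc i => acc ++ [(start_position.1, start_position.2 + i)]) []
    else if orientation = "v" then
      (PySem.List.pyRange 0 ship_size 1).foldl
        (fun acc i => acc ++ [(pyChr (pyOrd start_position.1 + i), start_position.2)]) []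
    else []
  checkLoop test_ship

-- ===== PORT B =====
def in_bounds_alt (start_position : String × Int) (ship_size : Int) (orientation : String) : Bool :=
  if orientation ≠ "h" ∧ orientation ≠ "v" then true
  else if ship_size < 1 then true
  else
    let row0 := pyOrd start_position.1
    let col0 := start_position.2
    let rc1 : Int × Int :=
      if orientation = "h" then (row0, col0 + ship_size - 1)
      else (row0 + ship_size - 1, col0)
    decide (65 ≤ row0 ∧ row0 ≤ 74 ∧ 0 ≤ col0 ∧ col0 ≤ 9 ∧
            65 ≤ rc1.1 ∧ rc1.1 ≤ 74 ∧ 0 ≤ rc1.2 ∧ rc1.2 ≤ 9)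

-- ===== PRECONDITION & SPEC =====
-- Pre_ excludes exactly the inputs where A raises: with orientation 'h'/'v' and ship_size ≥ 1,
-- ord() raises TypeError unless the row string has length 1, and for 'v' chr() raises ValueError
-- once ord(row) + ship_size - 1 exceeds 0x10FFFF.
def Pre_in_bounds (start_position : String × Int) (ship_size : Int) (orientation : String) : Prop :=
  (orientation = "h" ∨ orientation = "v") → 1 ≤ ship_size →
    (start_position.1.length = 1 ∧
     (orientation = "v" → pyOrd start_position.1 + ship_size - 1 ≤ 1114111))
instance (start_position : String × Int) (ship_size : Int) (orientation : String) : Decidable (Pre_in_bounds start_position ship_size orientation) := by unfold Pre_in_bounds; infer_instance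
def pvWitness_in_bounds : (String × Int) × Int × String := (("B", 3), 4, "h")

-- For orientation 'v' with a one-letter row and ship_size so large that ord(row)+ship_size-1 > 0x10FFFF,
-- A raises ValueError inside chr() while B (which never builds the cells) returns a value.
def Raises_in_bounds (start_position : String × Int) (ship_size : Int) (orientation : String) : Prop :=
  orientation = "v" ∧ 1 ≤ ship_size ∧ start_position.1.length = 1 ∧
  1114111 < pyOrd start_position.1 + ship_size - 1
instance (start_position : String × Int) (ship_size : Int) (orientation : String) : Decidable (Raises_in_bounds start_position ship_size orientation) := by unfold Raises_in_bounds; infer_instance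
def pvRaiseWitness_in_bounds : (String × Int) × Int × String := (("A", 0), 1114112, "v")
def pvRaiseWitnessOut_in_bounds : Bool := false

def Spec_in_bounds (start_position : String × Int) (ship_size : Int) (orientation : String) (out : Bool) : Prop := out = in_bounds_alt start_position ship_size orientation
instance (start_position : String × Int) (ship_size : Int) (orientation : String) (out : Bool) : Decidable (Spec_in_bounds start_position ship_size orientation out) := by unfold Spec_in_bounds; infer_instance

-- ===== CLAIM (what is proved, stated in full; the proofs are below) =====
def Claim_equal_in_bounds : Prop := ∀ (start_position : String × Int) (ship_size : Int) (orientation : String), Dom_in_bounds start_position ship_size orientation → Pre_in_bounds start_position ship_size orientation → Spec_in_bounds start_position ship_size orientation (in_bounds start_position ship_size orientation)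
def Claim_raises_in_bounds : Prop := (∀ (start_position : String × Int) (ship_size : Int) (orientation : String), Dom_in_bounds start_position ship_size orientation → Raises_in_bounds start_position ship_size orientation → ¬ Pre_in_bounds start_position ship_size orientation) ∧ (Dom_in_bounds (pvRaiseWitness_in_bounds.1) (pvRaiseWitness_in_bounds.2.1) (pvRaiseWitness_in_bounds.2.2) ∧ Raises_in_bounds (pvRaiseWitness_in_bounds.1) (pvRaiseWitness_in_bounds.2.1) (pvRaiseWitness_in_bounds.2.2) ∧ in_bounds_alt (pvRaiseWitness_in_bounds.1) (pvRaiseWitness_in_bounds.2.1) (pvRaiseWitness_in_bounds.2.2) = pvRaiseWitnessOut_in_bounds)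

-- ===== LEMMAS AND PROOFS =====

-- checkLoop is just "every cell passes both tests"
theorem checkLoop_eq_all (l : List (String × Int)) :
    checkLoop l = l.all (fun t => decide ((65 ≤ pyOrd t.1 ∧ pyOrd t.1 ≤ 74) ∧ 0 ≤ t.2 ∧ t.2 ≤ 9)) := by
  induction l with
  | nil => rfl
  | cons t rest ih =>
      simp only [checkLoop, List.all_cons, ih]
      by_cases h1 : pyOrd t.1 ≥ 65 ∧ pyOrd t.1 ≤ 74 <;>
        by_cases h2 : t.2 ≥ 0 ∧ t.2 ≤ 9 <;> simp [h1, h2]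

-- ord(chr(x)) = x for codes below the surrogate range
theorem ordL_valid (x : Int) (h0 : 0 ≤ x) (h : x < 55296) : pyOrd (pyChr x) = x := by
  simp only [pyOrd, pyChr, String.toList_ofList, List.headD_cons]
  rw [Char.toNat_ofNat, if_pos (Or.inl (by omega : x.toNat < 55296))]
  omega

theorem foldl_map {α β : Type} (l : List α) (f : α → β) :
    l.foldl (fun acc i => acc ++ [f i]) [] = l.map f :=
  by simpa using PySem.List.foldl_append_singleton_eq_map (l := l) (f := f) (acc := [])

-- all cells of a horizontal ship are in bounds ↔ its two endpoint cells are
theorem all_cells_h (s : String) (c n : Int) (hn : 1 ≤ n) :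
    ((PySem.List.pyRange 0 n 1).map (fun i => (s, c + i))).all
      (fun t => decide ((65 ≤ pyOrd t.1 ∧ pyOrd t.1 ≤ 74) ∧ 0 ≤ t.2 ∧ t.2 ≤ 9))
    = decide (65 ≤ pyOrd s ∧ pyOrd s ≤ 74 ∧ 0 ≤ c ∧ c ≤ 9 ∧
              65 ≤ pyOrd s ∧ pyOrd s ≤ 74 ∧ 0 ≤ c + n - 1 ∧ c + n - 1 ≤ 9) := by
  rw [Bool.eq_iff_iff]
  simp only [List.all_eq_true, List.mem_map, decide_eq_true_eq, PySem.List.mem_pyRange_one]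
  constructor
  · intro h
    have h0 := h (s, c + 0) ⟨0, ⟨le_refl _, by omega⟩, rfl⟩
    have h1 := h (s, c + (n - 1)) ⟨n - 1, ⟨by omega, by omega⟩, rfl⟩
    dsimp only at h0 h1
    omega
  · rintro h t ⟨i, hi, rfl⟩
    dsimp only
    omega

-- all cells of a vertical ship are in bounds ↔ its two endpoint cells are; within Dom (code ≤ 126)
-- the row codes A's result depends on stay below the surrogate range even when n is huge
theorem all_cells_v (s : String) (c n : Int) (hn : 1 ≤ n) (hr0 : 0 ≤ pyOrd s) (hr : pyOrd s ≤ 126) :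
    ((PySem.List.pyRange 0 n 1).map (fun i => (pyChr (pyOrd s + i), c))).all
      (fun t => decide ((65 ≤ pyOrd t.1 ∧ pyOrd t.1 ≤ 74) ∧ 0 ≤ t.2 ∧ t.2 ≤ 9))
    = decide (65 ≤ pyOrd s ∧ pyOrd s ≤ 74 ∧ 0 ≤ c ∧ c ≤ 9 ∧
              65 ≤ pyOrd s + n - 1 ∧ pyOrd s + n - 1 ≤ 74 ∧ 0 ≤ c ∧ c ≤ 9) := by
  rw [Bool.eq_iff_iff]
  simp only [List.all_eq_true, List.mem_map, decide_eq_true_eq, PySem.List.mem_pyRange_one]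
  constructor
  · intro h
    have h0 := h (pyChr (pyOrd s + 0), c) ⟨0, ⟨le_refl _, by omega⟩, rfl⟩
    dsimp only at h0
    rw [ordL_valid (pyOrd s + 0) (by omega) (by omega)] at h0
    by_cases hend : pyOrd s + n - 1 ≤ 74
    · exact ⟨by omega, by omega, by omega, by omega, by omega, by omega, by omega, by omega⟩
    · exfalso
      have h75 := h (pyChr (pyOrd s + (75 - pyOrd s)), c) ⟨75 - pyOrd s, ⟨by omega, by omega⟩, rfl⟩
      dsimp only at h75
      rw [ordL_valid (pyOrd s + (75 - pyOrd s)) (by omega) (by omega)] at h75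
      omega
  · rintro h t ⟨i, hi, rfl⟩
    dsimp only
    rw [ordL_valid (pyOrd s + i) (by omega) (by omega)]
    omega

-- the single character of a length-1 Dom string has code in [0, 126]
theorem dom_head_le (s : String) (hd : pvDomStr s = true) (hl : s.length = 1) :
    0 ≤ pyOrd s ∧ pyOrd s ≤ 126 := by
  simp only [pvDomStr, List.all_eq_true] at hd
  have hlen : s.toList.length = 1 := by rw [String.length_toList]; exact hl
  cases hls : s.toList with
  | nil => simp [hls] at hlen
  | cons c rest =>
      have hc := hd c (by simp [hls])
      simp only [pvDomChar, Bool.or_eq_true, Bool.and_eq_true, decide_eq_true_eq, beq_iff_eq] at hc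
      simp only [pyOrd, hls, List.headD_cons]
      omega

-- ===== VERDICT (by name: the statement is the Claim_ definition above) =====
theorem in_bounds_spec : Claim_equal_in_bounds := by
  intro sp n o hdom hpre
  unfold Spec_in_bounds in_bounds in_bounds_alt
  unfold Dom_in_bounds at hdom
  simp only [Bool.and_eq_true] at hdom
  by_cases hh : o = "h"
  · subst hh
    simp only [reduceIte, ne_eq]
    by_cases hn : n < 1
    · rw [PySem.List.pyRange_one_eq_nil (by omega), if_pos hn]
      rfl
    · rw [if_neg hn]
      obtain ⟨hlen, -⟩ := hpre (Or.inl rfl) (by omega)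
      obtain ⟨hge, hle⟩ := dom_head_le sp.1 hdom.1.1.1 hlen
      rw [foldl_map, checkLoop_eq_all, all_cells_h sp.1 sp.2 n (by omega)]
      exact rfl
  · by_cases hv : o = "v"
    · subst hv
      simp only [reduceIte, ne_eq, if_neg hh, not_true, and_false, if_false]
      by_cases hn : n < 1
      · rw [PySem.List.pyRange_one_eq_nil (by omega), if_pos hn]
        rfl
      · rw [if_neg hn]
        obtain ⟨hlen, -⟩ := hpre (Or.inr rfl) (by omega)
        obtain ⟨hge, hle⟩ := dom_head_le sp.1 hdom.1.1.1 hlen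
        rw [foldl_map, checkLoop_eq_all, all_cells_v sp.1 sp.2 n (by omega) hge hle]
    · rw [if_neg hh, if_neg hv, if_pos (And.intro hh hv)]
      rfl

theorem in_bounds_raises : Claim_raises_in_bounds := by
  unfold Claim_raises_in_bounds
  refine ⟨?_, by decide⟩
  intro sp n o _ hr hpre
  obtain ⟨ho, hn, hlen, hbig⟩ := hr
  obtain ⟨-, hbound⟩ := hpre (Or.inr ho) hn
  exact absurd (hbound ho) (by omega)

-- self-check: the raise-witness value stated above is the one B's port computes
theorem in_bounds_raises_witness_ok :
    in_bounds_alt pvRaiseWitness_in_bounds.1 pvRaiseWitness_in_bounds.2.1 pvRaiseWitness_in_bounds.2.2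
      = pvRaiseWitnessOut_in_bounds :=
  in_bounds_raises.2.2.2
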